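-- pv_equiv track=rewrite | github.com/MartinDupont/SchafkopfBot | card_counting/distribute_cards.py | only_choice_pairs
-- ===== SOURCE A (Python) =====
-- def only_choice_pairs(card_cons, number_cons, inplace = False):
--     """ If between a pair of players, the size of the union of their possible cards is
--     exacly equal to the sum of the number of cards they are to be given, then
--     those cards must be shared between the two players, and they can be
--     eliminated from the possibilities of the other player."""
--
--     if inplace:
--         #card_cons = copy.deepcopy(card_cons)
--         card_cons = {k: set(v) for k, v in card_cons.items()}
--
--     keys = list(card_cons.keys())
--     for key in keys:
--         not_keys = [k for k in keys if k != key]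
--         sum_n = 0
--         union_cons = set()
--         for k_2 in not_keys:
--             sum_n += number_cons[k_2]
--             union_cons.update(card_cons[k_2])
--
--         if len(union_cons) == sum_n:
--             card_cons[key] -= union_cons
--
--     return card_cons
-- ===== SOURCE B (Python) =====
-- def only_choice_pairs(card_cons, number_cons, inplace=False):
--     # One pass with precomputed suffix unions and a running prefix union,
--     # instead of re-scanning every other player for each key.
--     if inplace:
--         card_cons = {k: set(v) for k, v in card_cons.items()}
--     keys = list(card_cons.keys())
--     total = 0
--     for k in keys:
--         total += number_cons[k]
--     # after[i] = union of the ORIGINAL sets of keys[i:]; keys before the current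
--     # one may shrink during the pass, so their union is accumulated as we go.
--     after = [set()]
--     for k in reversed(keys):
--         after.insert(0, card_cons[k] | after[0])
--     prefix = set()
--     for key, suffix in zip(keys, after[1:]):
--         others = prefix | suffix
--         if len(others) == total - number_cons[key]:
--             card_cons[key] -= others
--         prefix |= card_cons[key]
--     return card_cons
-- ===== Notes on version B (the rewrite author's own statement) =====
-- stated objective: faster
-- what changed: A rescans all other players per key (recomputing their number sum and the union of their sets from scratch each iteration); B computes the total number sum once, precomputes suffix unions of the original sets back-to-front, and keeps a running prefix union of the already-finalized sets, so each key is handled from one prefix-suffix union instead of an inner loop over all other players.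
-- outside the precondition, e.g. on only_choice_pairs({'p': {'a'}}, {}, False): A returns {'p': {'a'}}, B raises KeyError
import Mathlib
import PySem

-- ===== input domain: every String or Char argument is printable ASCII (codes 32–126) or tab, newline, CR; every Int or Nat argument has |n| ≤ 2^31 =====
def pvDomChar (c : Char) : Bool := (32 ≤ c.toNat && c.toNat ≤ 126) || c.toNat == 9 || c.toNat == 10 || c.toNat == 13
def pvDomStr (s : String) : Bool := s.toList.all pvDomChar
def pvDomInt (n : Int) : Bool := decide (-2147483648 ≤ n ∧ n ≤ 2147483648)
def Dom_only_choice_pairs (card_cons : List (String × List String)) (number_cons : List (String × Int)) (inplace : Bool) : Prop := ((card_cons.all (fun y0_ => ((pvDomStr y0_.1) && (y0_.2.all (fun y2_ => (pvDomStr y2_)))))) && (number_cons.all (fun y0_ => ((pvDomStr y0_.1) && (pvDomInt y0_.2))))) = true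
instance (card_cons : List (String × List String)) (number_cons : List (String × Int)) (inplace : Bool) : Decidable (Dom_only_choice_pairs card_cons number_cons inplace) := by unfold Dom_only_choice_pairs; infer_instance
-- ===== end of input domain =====

-- B replaces A's quadratic rescan of all other players per key by one pass with
-- precomputed suffix unions and a running prefix union (objective: faster).
-- NOTE: when inplace = False the Python A (and B) mutate the card_cons argument
-- in place; the equivalence proved here is about the RETURN value only.

-- Shared dict/set primitives on association lists (values are Python sets):
-- d[k] with a present key (Pre_/loop keys guarantee presence; [] is never read otherwise)
def pvGet (d : List (String × List String)) (k : String) : List String :=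
  ((d.find? (fun p => p.1 == k)).map (fun p => p.2)).getD []
-- number_cons[k]; KeyError (absent key) is excluded by Pre_only_choice_pairs
def pvGetN (nc : List (String × Int)) (k : String) : Int :=
  ((nc.find? (fun p => p.1 == k)).map (fun p => p.2)).getD 0
-- d[k] = v for an already-present key k: overwrite in place
def pvSet (d : List (String × List String)) (k : String) (v : List String) : List (String × List String) :=
  d.map (fun p => if p.1 == k then (k, v) else p)
-- dict insertion (overwrite keeps position, new keys append), for the copy comprehension
def pvIns (d : List (String × List String)) (k : String) (v : List String) : List (String × List String) :=
  if d.any (fun p => p.1 == k) then pvSet d k v else d ++ [(k, v)]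

-- {k: set(v) for k, v in card_cons.items()} (the copy branch, identical in A and B)
def ocpCopyA (card_cons : List (String × List String)) : List (String × List String) :=
  card_cons.foldl (fun d kv => pvIns d kv.1 (PySem.Set.ofList kv.2)) []

-- ===== PORT A =====

-- the body of A's outer loop, for one key, over the fixed original keys list
def ocpStepA (number_cons : List (String × Int)) (keys : List String)
    (d : List (String × List String)) (key : String) : List (String × List String) :=
  let not_keys := keys.filter (fun k => k != key)
  let su := not_keys.foldl
      (fun (su : Int × List String) k2 =>
        (su.1 + pvGetN number_cons k2, PySem.Set.update su.2 (pvGet d k2))) (0, [])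
  if (su.2.length : Int) = su.1 then
    pvSet d key (PySem.Set.diff (pvGet d key) su.2)
  else d

def only_choice_pairs (card_cons : List (String × List String)) (number_cons : List (String × Int)) (inplace : Bool) : List (String × List String) :=
  let cc := if inplace then ocpCopyA card_cons else card_cons
  let keys := cc.map Prod.fst
  keys.foldl (ocpStepA number_cons keys) cc

-- ===== PORT B =====
-- the body of B's single pass: state is (dict, prefix union), input (key, suffix union)
def ocpStepB (number_cons : List (String × Int)) (total : Int)
    (st : List (String × List String) × List String) (p : String × List String) :
    List (String × List String) × List String :=
  let others := PySem.Set.union st.2 p.2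
  let d' := if (others.length : Int) = total - pvGetN number_cons p.1 then
      pvSet st.1 p.1 (PySem.Set.diff (pvGet st.1 p.1) others)
    else st.1
  (d', PySem.Set.union st.2 (pvGet d' p.1))

def only_choice_pairs_alt (card_cons : List (String × List String)) (number_cons : List (String × Int)) (inplace : Bool) : List (String × List String) :=
  let cc := if inplace then ocpCopyA card_cons else card_cons
  let keys := cc.map Prod.fst
  let total := keys.foldl (fun s k => s + pvGetN number_cons k) 0
  -- after = [set()]; for k in reversed(keys): after.insert(0, card_cons[k] | after[0])
  let after := keys.reverse.foldl
      (fun acc k => (PySem.Set.union (pvGet cc k) (acc.headD [])) :: acc) [([] : List String)]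
  ((keys.zip after.tail).foldl (ocpStepB number_cons total) (cc, [])).1

-- ===== PRECONDITION & SPEC =====
-- Pre_ excludes (a) association lists with duplicate card_cons keys or duplicate
-- elements inside a value, which do not represent the Python dict-of-sets argument
-- at all, and (b) card_cons keys absent from number_cons, on which A raises KeyError
-- whenever card_cons has ≥ 2 keys (the trivial 1-key case is excluded with them;
-- B raises KeyError there — see cites).
def Pre_only_choice_pairs (card_cons : List (String × List String)) (number_cons : List (String × Int)) (inplace : Bool) : Prop :=
  (card_cons.map Prod.fst).Nodup ∧ (∀ kv ∈ card_cons, kv.2.Nodup) ∧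
    ∀ kv ∈ card_cons, kv.1 ∈ number_cons.map Prod.fst
instance (card_cons : List (String × List String)) (number_cons : List (String × Int)) (inplace : Bool) : Decidable (Pre_only_choice_pairs card_cons number_cons inplace) := by unfold Pre_only_choice_pairs; infer_instance

def pvWitness_only_choice_pairs : (List (String × List String)) × (List (String × Int)) × Bool :=
  ([("a", ["x", "y"]), ("b", ["x"])], [("a", 1), ("b", 1)], false)

def Spec_only_choice_pairs (card_cons : List (String × List String)) (number_cons : List (String × Int)) (inplace : Bool) (out : List (String × List String)) : Prop := out = only_choice_pairs_alt card_cons number_cons inplace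
instance (card_cons : List (String × List String)) (number_cons : List (String × Int)) (inplace : Bool) (out : List (String × List String)) : Decidable (Spec_only_choice_pairs card_cons number_cons inplace out) := by unfold Spec_only_choice_pairs; infer_instance

-- ===== CLAIM (what is proved, stated in full; the proofs are below) =====
def Claim_equal_only_choice_pairs : Prop := ∀ (card_cons : List (String × List String)) (number_cons : List (String × Int)) (inplace : Bool), Dom_only_choice_pairs card_cons number_cons inplace → Pre_only_choice_pairs card_cons number_cons inplace → Spec_only_choice_pairs card_cons number_cons inplace (only_choice_pairs card_cons number_cons inplace)

-- ===== LEMMAS AND PROOFS =====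

-- B's suffix-union list, in recursive form: suffList cc ks = [⋃ cc[ks[i:]] for i ≤ |ks|]
def suffList (cc : List (String × List String)) : List String → List (List String)
  | [] => [[]]
  | k :: ks => (PySem.Set.union (pvGet cc k) ((suffList cc ks).headD [])) :: suffList cc ks

lemma suffList_build (cc : List (String × List String)) (ks : List String) :
    ks.reverse.foldl (fun acc k => (PySem.Set.union (pvGet cc k) (acc.headD [])) :: acc)
      [([] : List String)] = suffList cc ks := by
  induction ks with
  | nil => rfl
  | cons k ks ih =>
    rw [List.reverse_cons, List.foldl_append, ih]
    rfl

lemma mem_suffHead (cc : List (String × List String)) (ks : List String) (c : String) :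
    c ∈ (suffList cc ks).headD [] ↔ ∃ k ∈ ks, c ∈ pvGet cc k := by
  induction ks with
  | nil => simp [suffList]
  | cons k ks ih =>
    simp only [suffList, List.headD_cons, PySem.Set.mem_union, ih, List.mem_cons]
    constructor
    · rintro (h | ⟨k', hk', h⟩)
      exacts [⟨k, Or.inl rfl, h⟩, ⟨k', Or.inr hk', h⟩]
    · rintro ⟨k', (rfl | hk'), h⟩
      exacts [Or.inl h, Or.inr ⟨k', hk', h⟩]

lemma zip_suffList (cc : List (String × List String)) (key : String) (ks : List String) :
    (key :: ks).zip (suffList cc ks) =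
      (key, (suffList cc ks).headD []) :: ks.zip (suffList cc ks).tail := by
  cases ks <;> rfl

-- generic: a foldl building a pair componentwise is the pair of the foldls
lemma foldl_pair {α β γ : Type} (f : β → α → β) (g : γ → α → γ) (l : List α) (a : β) (b : γ) :
    l.foldl (fun su x => (f su.1 x, g su.2 x)) (a, b) = (l.foldl f a, l.foldl g b) := by
  induction l generalizing a b with
  | nil => rfl
  | cons x l ih => simp [List.foldl_cons, ih]

lemma foldl_add_shift (f : String → Int) (l : List String) (a : Int) :
    l.foldl (fun s k => s + f k) a = a + l.foldl (fun s k => s + f k) 0 := by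
  induction l generalizing a with
  | nil => simp
  | cons x l ih => rw [List.foldl_cons, List.foldl_cons, ih, ih (0 + f x)]; ring

lemma foldl_add_append (f : String → Int) (l₁ l₂ : List String) (a : Int) :
    (l₁ ++ l₂).foldl (fun s k => s + f k) a
      = l₁.foldl (fun s k => s + f k) a + l₂.foldl (fun s k => s + f k) 0 := by
  rw [List.foldl_append, foldl_add_shift]

lemma mem_unionFold (d : List (String × List String)) (l : List String) (u : List String)
    (c : String) :
    c ∈ l.foldl (fun u k => PySem.Set.update u (pvGet d k)) u ↔
      c ∈ u ∨ ∃ k ∈ l, c ∈ pvGet d k := by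
  induction l generalizing u with
  | nil => simp
  | cons k l ih => simp [List.foldl_cons, ih, PySem.Set.mem_update]; tauto

lemma nodup_unionFold (d : List (String × List String)) (l : List String) (u : List String)
    (hu : u.Nodup) : (l.foldl (fun u k => PySem.Set.update u (pvGet d k)) u).Nodup := by
  induction l generalizing u with
  | nil => exact hu
  | cons k l ih => exact ih _ (PySem.Set.nodup_update _ _ hu)

lemma pvGet_cons (p : String × List String) (d : List (String × List String)) (k : String) :
    pvGet (p :: d) k = if p.1 == k then p.2 else pvGet d k := by
  simp only [pvGet, List.find?_cons]
  cases hpk : (p.1 == k) <;> simp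

lemma pvSet_cons (p : String × List String) (d : List (String × List String)) (k : String)
    (v : List String) :
    pvSet (p :: d) k v = (if p.1 == k then (k, v) else p) :: pvSet d k v := rfl

lemma map_fst_pvSet (d : List (String × List String)) (k : String) (v : List String) :
    (pvSet d k v).map Prod.fst = d.map Prod.fst := by
  induction d with
  | nil => rfl
  | cons p d ih =>
    rw [pvSet_cons, List.map_cons, List.map_cons, ih]
    cases hpk : (p.1 == k)
    · simp
    · have hp1 : p.1 = k := by simpa using hpk
      simp [hp1]

lemma pvGet_pvSet_ne (d : List (String × List String)) (k k' : String) (v : List String)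
    (h : k' ≠ k) : pvGet (pvSet d k v) k' = pvGet d k' := by
  induction d with
  | nil => rfl
  | cons p d ih =>
    rw [pvSet_cons, pvGet_cons, pvGet_cons]
    cases hpk : (p.1 == k)
    · cases hq : (p.1 == k') <;> simp [hq, ih]
    · have hp1 : p.1 = k := by simpa using hpk
      have h1 : (k == k') = false := by simp [Ne.symm h]
      simp [hp1, h1, ih]

lemma nodup_length_eq {l₁ l₂ : List String} (h₁ : l₁.Nodup) (h₂ : l₂.Nodup)
    (h : ∀ c, c ∈ l₁ ↔ c ∈ l₂) : l₁.length = l₂.length :=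
  ((List.perm_ext_iff_of_nodup h₁ h₂).mpr h).length_eq

lemma diff_congr {s t t' : List String} (h : ∀ c, c ∈ t ↔ c ∈ t') :
    PySem.Set.diff s t = PySem.Set.diff s t' := by
  simp only [PySem.Set.diff]
  exact List.filter_congr (fun c _ => by
    by_cases hc : c ∈ t <;> simp [PySem.Set.contains_eq_listContains, (h c).symm, hc])

-- The main loop invariant: with ps already processed and ks remaining, A's loop from d
-- equals B's loop from (d, P) where P is the running prefix union of the processed keys.
lemma ocp_loop (number_cons : List (String × Int)) (cc : List (String × List String))
    (ks : List String) : ∀ (ps : List String) (d : List (String × List String))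
    (P : List String),
    (ps ++ ks).Nodup →
    d.map Prod.fst = ps ++ ks →
    P.Nodup →
    (∀ c, c ∈ P ↔ ∃ k ∈ ps, c ∈ pvGet d k) →
    (∀ k ∈ ks, pvGet d k = pvGet cc k) →
    ks.foldl (ocpStepA number_cons (ps ++ ks)) d
      = ((ks.zip (suffList cc ks).tail).foldl
          (ocpStepB number_cons ((ps ++ ks).foldl (fun s k => s + pvGetN number_cons k) 0))
          (d, P)).1 := by
  induction ks with
  | nil => intro ps d P _ _ _ _ _; rfl
  | cons key ks ih =>
    intro ps d P hnd hkd hPnd hPmem hrest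
    -- decompose B's zip
    have hz : (key :: ks).zip (suffList cc (key :: ks)).tail
        = (key, (suffList cc ks).headD []) :: ks.zip (suffList cc ks).tail := by
      simpa [suffList] using zip_suffList cc key ks
    -- key is fresh
    have hkey_ps : key ∉ ps := by
      intro h; exact (List.disjoint_of_nodup_append hnd) h (by simp)
    have hkey_ks : key ∉ ks :=
      (List.nodup_cons.mp (List.Nodup.of_append_right hnd)).1
    -- A's not_keys list is ps ++ ks
    have hfilter : (ps ++ key :: ks).filter (fun k => k != key) = ps ++ ks := by
      rw [List.filter_append]
      have h1 : ps.filter (fun k => k != key) = ps :=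
        List.filter_eq_self.mpr (fun k hk => bne_iff_ne.mpr (fun h => hkey_ps (h ▸ hk)))
      have h2 : (key :: ks).filter (fun k => k != key) = ks := by
        rw [List.filter_cons]
        rw [if_neg (by simp)]
        exact List.filter_eq_self.mpr (fun k hk => bne_iff_ne.mpr (fun h => hkey_ks (h ▸ hk)))
      rw [h1, h2]
    -- A's accumulated (sum, union) over the others
    have hpair := foldl_pair (fun s k => s + pvGetN number_cons k)
      (fun u k => PySem.Set.update u (pvGet d k)) (ps ++ ks) (0 : Int) ([] : List String)
    set uA : List String := (ps ++ ks).foldl (fun u k => PySem.Set.update u (pvGet d k)) []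
      with huA
    set sA : Int := (ps ++ ks).foldl (fun s k => s + pvGetN number_cons k) 0 with hsA
    -- B's others set
    set others : List String := PySem.Set.union P ((suffList cc ks).headD []) with hoth
    -- same members
    have hmem : ∀ c, c ∈ uA ↔ c ∈ others := by
      intro c
      rw [huA, mem_unionFold]
      simp only [hoth, PySem.Set.mem_union, mem_suffHead, hPmem, List.mem_append]
      constructor
      · rintro (h | ⟨k, (hk | hk), hck⟩)
        · simp at h
        · exact Or.inl ⟨k, hk, hck⟩
        · exact Or.inr ⟨k, hk, by rw [← hrest k (by simp [hk])]; exact hck⟩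
      · rintro (⟨k, hk, hck⟩ | ⟨k, hk, hck⟩)
        · exact Or.inr ⟨k, Or.inl hk, hck⟩
        · exact Or.inr ⟨k, Or.inr hk, by rw [hrest k (by simp [hk])]; exact hck⟩
    -- same length
    have hlen : uA.length = others.length :=
      nodup_length_eq (nodup_unionFold d (ps ++ ks) [] (by simp))
        (PySem.Set.nodup_union _ _ hPnd) hmem
    -- same sums
    have hsum : ((ps ++ key :: ks).foldl (fun s k => s + pvGetN number_cons k) 0)
        - pvGetN number_cons key = sA := by
      rw [hsA, show ps ++ key :: ks = (ps ++ [key]) ++ ks by simp,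
        foldl_add_append, foldl_add_append, foldl_add_append]
      simp [List.foldl_cons]; ring
    -- A's step equals B's step dict, and both branches give the same new dict d'
    have hstepA : ocpStepA number_cons (ps ++ key :: ks) d key
        = if (uA.length : Int) = sA then
            pvSet d key (PySem.Set.diff (pvGet d key) uA) else d := by
      simp only [ocpStepA, hfilter, hpair]
    set d' : List (String × List String) :=
      if (uA.length : Int) = sA then pvSet d key (PySem.Set.diff (pvGet d key) uA) else d
      with hd'
    have hstepB : ocpStepB number_cons
          ((ps ++ key :: ks).foldl (fun s k => s + pvGetN number_cons k) 0)
          (d, P) (key, (suffList cc ks).headD [])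
        = (d', PySem.Set.union P (pvGet d' key)) := by
      simp only [ocpStepB, hd']
      rw [show PySem.Set.union P ((suffList cc ks).headD []) = others from rfl]
      rw [show (others.length : Int) = (uA.length : Int) by rw [hlen]]
      rw [show ((ps ++ key :: ks).foldl (fun s k => s + pvGetN number_cons k) 0)
            - pvGetN number_cons key = sA from hsum]
      by_cases hc : (uA.length : Int) = sA
      · simp only [if_pos hc]
        rw [diff_congr (fun c => (hmem c).symm)]
      · simp only [if_neg hc]
    -- invariants for the tail call
    have hd'fst : d'.map Prod.fst = ps ++ key :: ks := by
      rw [hd']; by_cases hc : (uA.length : Int) = sA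
      · simp only [if_pos hc, map_fst_pvSet, hkd]
      · simp only [if_neg hc, hkd]
    have hd'get_ne : ∀ k, k ≠ key → pvGet d' k = pvGet d k := by
      intro k hk; rw [hd']; by_cases hc : (uA.length : Int) = sA
      · simp only [if_pos hc]; exact pvGet_pvSet_ne d key k _ hk
      · simp only [if_neg hc]
    have happ : (ps ++ [key]) ++ ks = ps ++ key :: ks := by simp
    have hrec := ih (ps ++ [key]) d' (PySem.Set.union P (pvGet d' key))
      (by rw [happ]; exact hnd)
      (by rw [happ]; exact hd'fst)
      (PySem.Set.nodup_union _ _ hPnd)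
      (by
        intro c
        simp only [PySem.Set.mem_union, List.mem_append, List.mem_singleton]
        constructor
        · rintro (hc | hc)
          · obtain ⟨k, hk, hck⟩ := (hPmem c).mp hc
            exact ⟨k, Or.inl hk, by rw [hd'get_ne k (fun h => hkey_ps (h ▸ hk))]; exact hck⟩
          · exact ⟨key, Or.inr rfl, hc⟩
        · rintro ⟨k, (hk | rfl), hck⟩
          · exact Or.inl ((hPmem c).mpr ⟨k, hk, by
              rw [← hd'get_ne k (fun h => hkey_ps (h ▸ hk))]; exact hck⟩)
          · exact Or.inr hck)
      (by
        intro k hk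
        rw [hd'get_ne k (fun h => hkey_ks (h ▸ hk))]
        exact hrest k (by simp [hk]))
    -- assemble
    rw [List.foldl_cons, hz, List.foldl_cons, hstepB, hstepA]
    calc ks.foldl (ocpStepA number_cons (ps ++ key :: ks)) d'
        = ks.foldl (ocpStepA number_cons ((ps ++ [key]) ++ ks)) d' := by rw [happ]
      _ = _ := by
          rw [hrec, happ]

-- dict keys stay unique through the copy comprehension
lemma map_fst_pvIns_nodup (d : List (String × List String)) (k : String) (v : List String)
    (h : (d.map Prod.fst).Nodup) : ((pvIns d k v).map Prod.fst).Nodup := by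
  unfold pvIns
  by_cases hc : d.any (fun p => p.1 == k)
  · simp only [if_pos hc, map_fst_pvSet]; exact h
  · have hk : k ∉ d.map Prod.fst := by
      intro hm
      rcases List.mem_map.mp hm with ⟨p, hp, he⟩
      exact hc (List.any_eq_true.mpr ⟨p, hp, by simp [he]⟩)
    simp only [if_neg hc, List.map_append, List.map_cons, List.map_nil]
    exact List.Nodup.append h (by simp) (by simpa using hk)

lemma nodup_keys_copy (l : List (String × List String)) :
    ∀ d : List (String × List String), (d.map Prod.fst).Nodup →
    ((l.foldl (fun d kv => pvIns d kv.1 (PySem.Set.ofList kv.2)) d).map Prod.fst).Nodup := by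
  induction l with
  | nil => intro d h; exact h
  | cons kv l ih =>
    intro d h
    exact ih _ (map_fst_pvIns_nodup d kv.1 _ h)

-- top-level: run the invariant from the start (ps = [], P = ∅)
lemma ocp_main (number_cons : List (String × Int)) (cc : List (String × List String))
    (hnd : (cc.map Prod.fst).Nodup) :
    (cc.map Prod.fst).foldl (ocpStepA number_cons (cc.map Prod.fst)) cc
      = (((cc.map Prod.fst).zip (suffList cc (cc.map Prod.fst)).tail).foldl
          (ocpStepB number_cons
            ((cc.map Prod.fst).foldl (fun s k => s + pvGetN number_cons k) 0))
          (cc, [])).1 := by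
  have := ocp_loop number_cons cc (cc.map Prod.fst) [] cc []
    (by simpa using hnd) (by simp) (by simp) (by simp) (fun _ _ => rfl)
  simpa using this

-- ===== VERDICT (by name: the statement is the Claim_ definition above) =====
theorem only_choice_pairs_spec : Claim_equal_only_choice_pairs := by
  intro card_cons number_cons inplace _ hpre
  unfold Spec_only_choice_pairs only_choice_pairs only_choice_pairs_alt
  cases inplace with
  | false =>
    show (card_cons.map Prod.fst).foldl
        (ocpStepA number_cons (card_cons.map Prod.fst)) card_cons
      = (((card_cons.map Prod.fst).zip
            (((card_cons.map Prod.fst).reverse.foldl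
              (fun acc k => (PySem.Set.union (pvGet card_cons k) (acc.headD [])) :: acc)
              [([] : List String)]).tail)).foldl
          (ocpStepB number_cons
            ((card_cons.map Prod.fst).foldl (fun s k => s + pvGetN number_cons k) 0))
          (card_cons, [])).1
    rw [suffList_build, ocp_main number_cons card_cons hpre.1]
  | true =>
    show ((ocpCopyA card_cons).map Prod.fst).foldl
        (ocpStepA number_cons ((ocpCopyA card_cons).map Prod.fst)) (ocpCopyA card_cons)
      = ((((ocpCopyA card_cons).map Prod.fst).zip
            ((((ocpCopyA card_cons).map Prod.fst).reverse.foldl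
              (fun acc k => (PySem.Set.union (pvGet (ocpCopyA card_cons) k) (acc.headD [])) :: acc)
              [([] : List String)]).tail)).foldl
          (ocpStepB number_cons
            (((ocpCopyA card_cons).map Prod.fst).foldl (fun s k => s + pvGetN number_cons k) 0))
          (ocpCopyA card_cons, [])).1
    rw [suffList_build, ocp_main number_cons (ocpCopyA card_cons)
      (nodup_keys_copy card_cons [] (by simp))]
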